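-- pv_equiv track=rewrite | github.com/YeRyeongLee/codingtest | programmers/오픈채팅방.py | solution
-- ===== SOURCE A (Python) =====
-- def solution(record):
--     answer = []
--
--     id_name = {}
--
--     for string in record:
--         cmd = list(string.split())
--
--         if cmd[0] == "Enter":
--             id_name[cmd[1]] = cmd[2]
--         elif cmd[0] == "Change":
--             id_name[cmd[1]] = cmd[2]
--
--     for string in record:
--         cmd = list(string.split())
--
--         if cmd[0] == "Enter":
--             answer.append(id_name[cmd[1]]+"님이 들어왔습니다.")
--         elif cmd[0] == "Leave":
--             answer.append(id_name[cmd[1]]+"님이 나갔습니다.")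
--
--
--     return answer
-- ===== SOURCE B (Python) =====
-- def solution(record):
--     id_name = {}
--     events = []
--     for string in record:
--         cmd = string.split()
--         act = cmd[0]
--         if act == "Enter":
--             id_name[cmd[1]] = cmd[2]
--             events.append((cmd[1], True))
--         elif act == "Change":
--             id_name[cmd[1]] = cmd[2]
--         elif act == "Leave":
--             events.append((cmd[1], False))
--     return [id_name[i] + ("님이 들어왔습니다." if entered else "님이 나갔습니다.")
--             for i, entered in events]
-- ===== Notes on version B (the rewrite author's own statement) =====
-- stated objective: faster
-- what changed: B makes a single pass over the raw records, splitting each string once while building the name dict and a compact (id, entered) event list together, then renders the messages from the event list; A splits every record twice in two full passes.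
import Mathlib
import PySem

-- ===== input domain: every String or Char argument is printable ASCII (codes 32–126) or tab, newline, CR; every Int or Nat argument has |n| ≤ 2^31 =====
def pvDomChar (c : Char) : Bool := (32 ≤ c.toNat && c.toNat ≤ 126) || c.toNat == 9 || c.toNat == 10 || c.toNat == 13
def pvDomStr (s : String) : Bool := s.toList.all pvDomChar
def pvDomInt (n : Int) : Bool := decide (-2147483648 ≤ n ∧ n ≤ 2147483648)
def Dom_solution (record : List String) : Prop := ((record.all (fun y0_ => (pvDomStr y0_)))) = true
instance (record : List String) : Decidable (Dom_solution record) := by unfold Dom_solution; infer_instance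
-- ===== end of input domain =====

-- B builds the dict and a compact (id, entered) event list in one pass over the records
-- (each string split once), then renders the messages from the events; A re-splits all
-- records in a second full pass. Equivalence of the RETURN values on Pre_solution.

-- ===== PORT A =====
-- first loop: if cmd[0]=="Enter"/"Change": id_name[cmd[1]] = cmd[2]
-- (cmd[0]/cmd[1]/cmd[2] as getD with default "": Python raises exactly on the inputs Pre_ excludes)
def solStepDict (d : PySem.Dict String String) (s : String) : PySem.Dict String String :=
  if (PySem.Str.split₀ s).getD 0 "" = "Enter" then
    d.insert ((PySem.Str.split₀ s).getD 1 "") ((PySem.Str.split₀ s).getD 2 "")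
  else if (PySem.Str.split₀ s).getD 0 "" = "Change" then
    d.insert ((PySem.Str.split₀ s).getD 1 "") ((PySem.Str.split₀ s).getD 2 "")
  else d

-- second loop: append the message on Enter/Leave (dict lookup with default "": KeyError excluded by Pre_)
def solStepAns (d : PySem.Dict String String) (ans : List String) (s : String) : List String :=
  if (PySem.Str.split₀ s).getD 0 "" = "Enter" then
    ans ++ [d.getD ((PySem.Str.split₀ s).getD 1 "") "" ++ "님이 들어왔습니다."]
  else if (PySem.Str.split₀ s).getD 0 "" = "Leave" then
    ans ++ [d.getD ((PySem.Str.split₀ s).getD 1 "") "" ++ "님이 나갔습니다."]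
  else ans

def solution (record : List String) : List String :=
  record.foldl (solStepAns (record.foldl solStepDict PySem.Dict.empty)) []

-- ===== PORT B =====
-- single pass: maintain (id_name, events) together
def solAltStep (st : PySem.Dict String String × List (String × Bool)) (s : String) :
    PySem.Dict String String × List (String × Bool) :=
  if (PySem.Str.split₀ s).getD 0 "" = "Enter" then
    (st.1.insert ((PySem.Str.split₀ s).getD 1 "") ((PySem.Str.split₀ s).getD 2 ""),
      st.2 ++ [((PySem.Str.split₀ s).getD 1 "", true)])
  else if (PySem.Str.split₀ s).getD 0 "" = "Change" then
    (st.1.insert ((PySem.Str.split₀ s).getD 1 "") ((PySem.Str.split₀ s).getD 2 ""), st.2)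
  else if (PySem.Str.split₀ s).getD 0 "" = "Leave" then
    (st.1, st.2 ++ [((PySem.Str.split₀ s).getD 1 "", false)])
  else st

-- the message for one event (the comprehension's expression)
def solMsg (d : PySem.Dict String String) (e : String × Bool) : String :=
  d.getD e.1 "" ++ (if e.2 then "님이 들어왔습니다." else "님이 나갔습니다.")

def solution_alt (record : List String) : List String :=
  ((record.foldl solAltStep (PySem.Dict.empty, [])).2).map
    (solMsg (record.foldl solAltStep (PySem.Dict.empty, [])).1)

-- ===== PRECONDITION & SPEC =====
-- Pre_ excludes exactly the inputs on which A raises: a record whose split is empty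
-- (IndexError on cmd[0]), an Enter/Change line with fewer than 3 tokens or a Leave line
-- with fewer than 2 (IndexError), and a Leave whose id is never set by a well-formed
-- Enter/Change line (KeyError).
def Pre_solution (record : List String) : Prop :=
  ∀ s ∈ record,
    PySem.Str.split₀ s ≠ [] ∧
    ((PySem.Str.split₀ s).headD "" = "Enter" ∨ (PySem.Str.split₀ s).headD "" = "Change" →
      3 ≤ (PySem.Str.split₀ s).length) ∧
    ((PySem.Str.split₀ s).headD "" = "Leave" →
      2 ≤ (PySem.Str.split₀ s).length ∧
      ∃ t ∈ record, 3 ≤ (PySem.Str.split₀ t).length ∧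
        ((PySem.Str.split₀ t).headD "" = "Enter" ∨ (PySem.Str.split₀ t).headD "" = "Change") ∧
        (PySem.Str.split₀ t).getD 1 "" = (PySem.Str.split₀ s).getD 1 "")

instance (record : List String) : Decidable (Pre_solution record) := by
  unfold Pre_solution; infer_instance

def pvWitness_solution : List String :=
  ["Enter uid1 Muzi", "Enter uid2 Prodo", "Leave uid1", "Change uid2 Ryan"]

def Spec_solution (record : List String) (out : List String) : Prop := out = solution_alt record
instance (record : List String) (out : List String) : Decidable (Spec_solution record out) := by unfold Spec_solution; infer_instance

-- ===== CLAIM (what is proved, stated in full; the proofs are below) =====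
def Claim_equal_solution : Prop := ∀ (record : List String), Dom_solution record → Pre_solution record → Spec_solution record (solution record)

-- ===== LEMMAS AND PROOFS =====

-- the per-record contribution to B's event list
def solEvHead (cmd : List String) : List (String × Bool) :=
  if cmd.getD 0 "" = "Enter" then [(cmd.getD 1 "", true)]
  else if cmd.getD 0 "" = "Change" then []
  else if cmd.getD 0 "" = "Leave" then [(cmd.getD 1 "", false)]
  else []

-- the events B's fold accumulates, characterised structurally
def solEvts : List String → List (String × Bool)
  | [] => []
  | s :: rest => solEvHead (PySem.Str.split₀ s) ++ solEvts rest

lemma solAltStep_eq (d : PySem.Dict String String) (ev : List (String × Bool)) (s : String) :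
    solAltStep (d, ev) s = (solStepDict d s, ev ++ solEvHead (PySem.Str.split₀ s)) := by
  unfold solAltStep solStepDict solEvHead
  split_ifs <;> simp

lemma solAltStep_foldl (record : List String) :
    ∀ d ev, record.foldl solAltStep (d, ev) = (record.foldl solStepDict d, ev ++ solEvts record) := by
  induction record with
  | nil => intro d ev; simp [solEvts]
  | cons s rest ih =>
    intro d ev
    rw [List.foldl_cons, List.foldl_cons, solAltStep_eq, ih]
    simp [solEvts]

lemma solStepAns_eq (d : PySem.Dict String String) (ans : List String) (s : String) :
    solStepAns d ans s = ans ++ (solEvHead (PySem.Str.split₀ s)).map (solMsg d) := by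
  unfold solStepAns solEvHead solMsg
  split_ifs <;> simp_all

-- A's second pass over the raw records renders B's event list
lemma solStepAns_foldl (d : PySem.Dict String String) (record : List String) :
    ∀ ans, record.foldl (solStepAns d) ans = ans ++ (solEvts record).map (solMsg d) := by
  induction record with
  | nil => intro ans; simp [solEvts]
  | cons s rest ih =>
    intro ans
    rw [List.foldl_cons, solStepAns_eq, ih]
    simp [solEvts]

-- ===== VERDICT (by name: the statement is the Claim_ definition above) =====
theorem solution_spec : Claim_equal_solution := by
  intro record _ _
  unfold Spec_solution solution solution_alt
  rw [solAltStep_foldl record PySem.Dict.empty [], solStepAns_foldl _ record []]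
  simp
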